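-- pv_equiv track=rewrite | github.com/blegloannec/CodeProblems | Kattis/evenodd.py | S
-- ===== SOURCE A (Python) =====
-- def f(x):
--     i = 0
--     while x>1:
--         if x&1==0:
--             x >>= 1
--         else:
--             x += 1
--         i += 1
--     return i
--
-- def S(n):
--     if n<=1:
--         return 0
--     if n==2:
--         return 1
--     if n&1==0:
--         # even nbs 2..n   are /2      -> n/2 + S(n/2)
--         # odd  nbs 3..n-1 are +1 & /2 -> 2*(n/2-1) + S(n/2)
--         n >>= 1
--         return 2*S(n) + 3*n - 2
--     else:
--         return f(n) + S(n-1)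
-- ===== SOURCE B (Python) =====
-- def S(n):
--     # S(n) = sum of f(k) for k=1..n. Splitting that sum by the parity of k gives,
--     # for the pair (S(k), S(k+1)), a single halving recursion with no calls to f.
--     if n <= 1:
--         return 0
--     def go(k):  # returns (S(k), S(k+1)), for k >= 1
--         if k == 1:
--             return (0, 1)
--         a = k >> 1
--         A, B = go(a)
--         if k & 1 == 0:
--             return (2 * A + 3 * a - 2, A + B + 3 * a)
--         else:
--             return (A + B + 3 * a, 2 * B + 3 * a + 1)
--     return go(n)[0]
-- ===== Notes on version B (the rewrite author's own statement) =====
-- stated objective: alternative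
-- what changed: Instead of A's recurrence (closed-form halving on even n, f(n)+S(n-1) on odd n), B computes the pair (S(k), S(k+1)) by a single halving recursion obtained from splitting the sum of f(k) by the parity of k, so it never calls the step-count helper f at all.
import Mathlib
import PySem

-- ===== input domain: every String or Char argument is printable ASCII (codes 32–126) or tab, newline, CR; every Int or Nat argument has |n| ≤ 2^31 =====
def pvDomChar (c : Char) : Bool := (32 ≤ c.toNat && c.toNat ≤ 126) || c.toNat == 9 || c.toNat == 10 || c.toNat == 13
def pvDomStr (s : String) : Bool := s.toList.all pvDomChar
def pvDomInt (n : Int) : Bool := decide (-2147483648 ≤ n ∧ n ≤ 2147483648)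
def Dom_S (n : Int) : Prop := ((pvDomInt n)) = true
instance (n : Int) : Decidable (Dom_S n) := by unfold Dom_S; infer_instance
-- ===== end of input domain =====

-- B computes the pair (S(k), S(k+1)) by one halving recursion obtained by splitting the sum
-- of f(k) by parity; it needs no helper f and no odd-step descent.

-- ===== PORT A =====
-- helper f: the while-loop with a fuel counter that only makes it total
-- (fFuel x is always enough fuel; fuel-irrelevance is proved below).
def fLoop : Nat → Int → Int → Int
  | 0, _, i => i
  | fuel+1, x, i =>
    if x > 1 then
      if PySem.Int.band x 1 = 0 then fLoop fuel (x >>> (1:Nat)) (i+1)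
      else fLoop fuel (x+1) (i+1)
    else i

def fFuel (x : Int) : Nat := 2 * x.toNat + (if x % 2 = 0 then 2 else 6)

def f (x : Int) : Int := fLoop (fFuel x) x 0

def S (n : Int) : Int :=
  if n ≤ 1 then 0
  else if n = 2 then 1
  else if PySem.Int.band n 1 = 0 then
    let m := n >>> (1:Nat)
    2 * S m + 3 * m - 2
  else f n + S (n - 1)
termination_by n.toNat
decreasing_by
  · simp only [Int.shiftRight_eq_div_pow]; omega
  · omega

-- ===== PORT B =====
-- go k = (S(k), S(k+1)) for k ≥ 1, by halving
def goB (k : Int) : Int × Int :=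
  if k = 1 then (0, 1)
  else
    let a := k >>> (1:Nat)
    if 1 ≤ a ∧ a < k then  -- guard making the recursion well-founded; holds whenever k ≥ 2 (B only calls go there)
      let p := goB a
      if PySem.Int.band k 1 = 0 then (2 * p.1 + 3 * a - 2, p.1 + p.2 + 3 * a)
      else (p.1 + p.2 + 3 * a, 2 * p.2 + 3 * a + 1)
    else (0, 0)
termination_by k.toNat
decreasing_by simp only [Int.shiftRight_eq_div_pow] at *; omega

def S_alt (n : Int) : Int := if n ≤ 1 then 0 else (goB n).1

-- ===== PRECONDITION & SPEC =====
def Spec_S (n : Int) (out : Int) : Prop := out = S_alt n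
instance (n : Int) (out : Int) : Decidable (Spec_S n out) := by unfold Spec_S; infer_instance

-- ===== CLAIM (what is proved, stated in full; the proofs are below) =====
def Claim_equal_S : Prop := ∀ (n : Int), Dom_S n → Spec_S n (S n)

-- ===== LEMMAS AND PROOFS =====

theorem fLoop_succ (fuel : Nat) (x i : Int) :
    fLoop (fuel+1) x i =
      if x > 1 then
        if PySem.Int.band x 1 = 0 then fLoop fuel (x >>> (1:Nat)) (i+1)
        else fLoop fuel (x+1) (i+1)
      else i := rfl

theorem fLoop_le_one (fuel : Nat) (x i : Int) (h : x ≤ 1) : fLoop fuel x i = i := by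
  cases fuel
  · rfl
  · rw [fLoop_succ, if_neg (by omega)]

theorem band_one_emod (x : Int) : PySem.Int.band x 1 = x % 2 := by
  rw [PySem.Int.band_one, PySem.Int.mod_eq_emod_of_pos (by omega)]

theorem shiftR_one (x : Int) : x >>> (1:Nat) = x / 2 := by
  simp [Int.shiftRight_eq_div_pow]

theorem fLoop_acc (fuel : Nat) (x i : Int) : fLoop fuel x i = i + fLoop fuel x 0 := by
  induction fuel generalizing x i with
  | zero => simp [fLoop]
  | succ k ih =>
    rw [fLoop_succ k x i, fLoop_succ k x 0]
    by_cases hx : x > 1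
    · rw [if_pos hx, if_pos hx]
      by_cases he : PySem.Int.band x 1 = 0
      · rw [if_pos he, if_pos he, ih _ (i+1), ih _ (0+1)]; ring
      · rw [if_neg he, if_neg he, ih _ (i+1), ih _ (0+1)]; ring
    · rw [if_neg hx, if_neg hx]; ring

theorem fLoop_stable (fuel : Nat) : ∀ x i : Int, fFuel x ≤ fuel →
    fLoop (fuel+1) x i = fLoop fuel x i := by
  induction fuel with
  | zero =>
    intro x i h
    exfalso; unfold fFuel at h; split_ifs at h <;> omega
  | succ k ih =>
    intro x i h
    rw [fLoop_succ (k+1) x i, fLoop_succ k x i]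
    by_cases hx : x > 1
    · rw [if_pos hx, if_pos hx]
      by_cases he : PySem.Int.band x 1 = 0
      · rw [if_pos he, if_pos he, shiftR_one]
        have hmod : x % 2 = 0 := by rw [← band_one_emod]; exact he
        by_cases hle : x / 2 ≤ 1
        · rw [fLoop_le_one _ _ _ hle, fLoop_le_one _ _ _ hle]
        · apply ih
          unfold fFuel at h ⊢
          split_ifs at h ⊢ <;> omega
      · rw [if_neg he, if_neg he]
        have hmod : x % 2 = 1 := by have hb := band_one_emod x; rw [hb] at he; omega
        apply ih
        unfold fFuel at h ⊢
        split_ifs at h ⊢ <;> omega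
    · rw [if_neg hx, if_neg hx]

theorem fLoop_of_ge (x i : Int) (fuel : Nat) (h : fFuel x ≤ fuel) :
    fLoop fuel x i = fLoop (fFuel x) x i := by
  induction fuel, h using Nat.le_induction with
  | base => rfl
  | succ m hm ih => rw [fLoop_stable m x i hm, ih]

theorem fFuel_pos (x : Int) : 0 < fFuel x := by
  unfold fFuel; split_ifs <;> omega

theorem f_step_even (x : Int) (h1 : 1 < x) (h2 : x % 2 = 0) : f x = f (x / 2) + 1 := by
  obtain ⟨k, hk⟩ : ∃ k, fFuel x = k + 1 := ⟨fFuel x - 1, by have := fFuel_pos x; omega⟩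
  have hband : PySem.Int.band x 1 = 0 := by rw [band_one_emod]; omega
  unfold f
  rw [hk, fLoop_succ, if_pos h1, if_pos hband, shiftR_one, fLoop_acc]
  by_cases hle : x / 2 ≤ 1
  · rw [fLoop_le_one _ _ _ hle, fLoop_le_one _ _ _ hle]; ring
  · rw [fLoop_of_ge _ _ k (by unfold fFuel at hk ⊢; split_ifs at hk ⊢ <;> omega)]
    ring

theorem f_step_odd (x : Int) (h1 : 1 < x) (h2 : x % 2 = 1) : f x = f (x + 1) + 1 := by
  obtain ⟨k, hk⟩ : ∃ k, fFuel x = k + 1 := ⟨fFuel x - 1, by have := fFuel_pos x; omega⟩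
  have hband : ¬ PySem.Int.band x 1 = 0 := by rw [band_one_emod]; omega
  unfold f
  rw [hk, fLoop_succ, if_pos h1, if_neg hband, fLoop_acc]
  rw [fLoop_of_ge _ _ k (by unfold fFuel at hk ⊢; split_ifs at hk ⊢ <;> omega)]
  ring

theorem f_even (j : Int) (h : 1 ≤ j) : f (2 * j) = f j + 1 := by
  by_cases hj : j = 1
  · subst hj; decide
  · rw [f_step_even (2*j) (by omega) (by omega),
        Int.mul_ediv_cancel_left j (by norm_num : (2:Int) ≠ 0)]

theorem f_odd (j : Int) (h : 1 ≤ j) : f (2 * j + 1) = f (j + 1) + 2 := by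
  rw [f_step_odd (2*j+1) (by omega) (by omega),
      show 2*j+1+1 = 2*(j+1) by ring, f_even (j+1) (by omega)]
  ring

def sumF : Nat → Int
  | 0 => 0
  | m+1 => sumF m + f ((m : Int) + 1)

theorem sumF_double (m : Nat) (h : 1 ≤ m) : sumF (2 * m) = 2 * sumF m + 3 * m - 2 := by
  induction m, h using Nat.le_induction with
  | base =>
    show sumF 2 = 2 * sumF 1 + 3 * 1 - 2
    have h1 : f 1 = 0 := by decide
    have h2 : f 2 = 1 := by decide
    show (sumF 0 + f ((0:Int)+1)) + f ((1:Int)+1) = 2 * (sumF 0 + f ((0:Int)+1)) + 3 * 1 - 2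
    norm_num [sumF, h1, h2]
  | succ m hm ih =>
    have e : 2 * (m + 1) = (2 * m + 1) + 1 := by omega
    rw [e]
    show (sumF (2*m) + f (((2*m : Nat) : Int) + 1)) + f (((2*m+1 : Nat) : Int) + 1) = _
    rw [ih]
    have c1 : ((2*m : Nat) : Int) + 1 = 2 * (m : Int) + 1 := by push_cast; ring
    have c2 : ((2*m+1 : Nat) : Int) + 1 = 2 * ((m : Int) + 1) := by push_cast; ring
    rw [c1, c2, f_odd (m : Int) (by exact_mod_cast hm), f_even ((m : Int) + 1) (by omega)]
    show _ = 2 * (sumF m + f ((m : Int) + 1)) + 3 * ((m + 1 : Nat) : Int) - 2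
    push_cast
    ring

theorem S_eq_sumF_aux (N : Nat) : ∀ n : Int, n.toNat ≤ N → S n = sumF n.toNat := by
  induction N with
  | zero =>
    intro n hn
    rw [S, if_pos (by omega)]
    have h0 : n.toNat = 0 := by omega
    rw [h0]; rfl
  | succ N ih =>
    intro n hn
    rw [S]
    by_cases h1 : n ≤ 1
    · rw [if_pos h1]
      have : n.toNat = 0 ∨ n.toNat = 1 := by omega
      rcases this with h | h <;> rw [h]
      · rfl
      · show (0:Int) = sumF 0 + f ((0:Int)+1)
        norm_num [sumF, show f 1 = 0 from by decide]
    · rw [if_neg h1]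
      by_cases h2 : n = 2
      · rw [if_pos h2]
        subst h2
        show (1:Int) = sumF 2
        show (1:Int) = (sumF 0 + f ((0:Int)+1)) + f ((1:Int)+1)
        norm_num [sumF, show f 1 = 0 from by decide, show f 2 = 1 from by decide]
      · rw [if_neg h2]
        by_cases h3 : PySem.Int.band n 1 = 0
        · rw [if_pos h3]
          have hmod : n % 2 = 0 := by rw [← band_one_emod]; exact h3
          simp only [shiftR_one]
          have hn4 : 4 ≤ n := by omega
          rw [ih (n / 2) (by omega)]
          have hdt : n.toNat = 2 * (n / 2).toNat := by omega
          rw [hdt, sumF_double _ (by omega)]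
          have hc : (((n / 2).toNat : Nat) : Int) = n / 2 := by omega
          rw [hc]
        · rw [if_neg h3]
          have hmod : n % 2 = 1 := by have := band_one_emod n; rw [this] at h3; omega
          have hn3 : 3 ≤ n := by omega
          rw [ih (n - 1) (by omega)]
          have hdt : n.toNat = (n - 1).toNat + 1 := by omega
          rw [hdt]
          show f n + sumF ((n-1).toNat) = sumF ((n-1).toNat) + f (((n-1).toNat : Int) + 1)
          rw [show ((n-1).toNat : Int) + 1 = n by omega]
          ring

theorem sumF_odd (a : Nat) (h : 1 ≤ a) :
    sumF (2 * a + 1) = sumF a + sumF (a + 1) + 3 * a := by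
  show sumF (2*a) + f (((2*a : Nat) : Int) + 1) = _
  rw [sumF_double a h,
      show ((2*a : Nat) : Int) + 1 = 2 * (a : Int) + 1 by push_cast; ring,
      f_odd (a : Int) (by exact_mod_cast h),
      show sumF (a+1) = sumF a + f ((a : Int) + 1) from rfl]
  ring

theorem goB_eq (N : Nat) : ∀ k : Int, k.toNat ≤ N → 1 ≤ k →
    goB k = (sumF k.toNat, sumF (k.toNat + 1)) := by
  induction N with
  | zero => intro k hN hk; omega
  | succ N ih =>
    intro k hN hk
    by_cases h1 : k = 1
    · subst h1
      show goB 1 = (sumF 1, sumF 2)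
      rw [goB]
      norm_num [sumF, show f 1 = 0 from by decide, show f 2 = 1 from by decide]
    · have hk2 : 2 ≤ k := by omega
      rw [goB, if_neg h1]
      simp only [shiftR_one]
      have ha : 1 ≤ k / 2 ∧ k / 2 < k := by omega
      rw [if_pos ha]
      have hrec : goB (k / 2) = (sumF (k / 2).toNat, sumF ((k / 2).toNat + 1)) :=
        ih (k / 2) (by omega) (by omega)
      rw [hrec]
      set a : Nat := (k / 2).toNat with hadef
      have hca : ((a : Nat) : Int) = k / 2 := by omega
      by_cases he : PySem.Int.band k 1 = 0
      · have hmod : k % 2 = 0 := by rw [← band_one_emod]; exact he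
        have h2a : k.toNat = 2 * a := by omega
        rw [if_pos he, h2a, sumF_double a (by omega), sumF_odd a (by omega), ← hca]
      · have hmod : k % 2 = 1 := by have := band_one_emod k; rw [this] at he; omega
        have h2a : k.toNat = 2 * a + 1 := by omega
        rw [if_neg he, h2a, show 2*a+1+1 = 2*(a+1) by ring,
            sumF_double (a+1) (by omega), sumF_odd a (by omega), ← hca]
        simp only [Prod.mk.injEq]
        push_cast
        refine ⟨trivial, by ring⟩

theorem S_alt_eq_sumF (n : Int) : S_alt n = sumF n.toNat := by
  unfold S_alt
  by_cases h : n ≤ 1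
  · rw [if_pos h]
    have : n.toNat = 0 ∨ n.toNat = 1 := by omega
    rcases this with h0 | h0 <;> rw [h0]
    · rfl
    · show (0:Int) = sumF 0 + f ((0:Int)+1)
      norm_num [sumF, show f 1 = 0 from by decide]
  · rw [if_neg h, goB_eq n.toNat n (le_refl _) (by omega)]

-- ===== VERDICT (by name: the statement is the Claim_ definition above) =====
theorem S_spec : Claim_equal_S := by
  intro n _
  unfold Spec_S
  rw [S_eq_sumF_aux n.toNat n (le_refl _), S_alt_eq_sumF]
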